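-- pv_equiv track=rewrite | github.com/bpa/advent-of-code | 2015/python/day24.py | solve
-- ===== SOURCE A (Python) =====
-- def solve(input, compartments):
--     presents = [int(l) for l in input.splitlines()]
--     presents.sort(reverse=True)
--     desired = sum(presents) // compartments
--     total_presents = len(presents)
--     included = [False] * len(presents)
--     (best_count, best_qe) = (1000, 1000)
--     (i, count, qe, weight) = (0, 0, 1, 0)
--     while True:
--         while i < total_presents and weight < desired and count < best_count:
--             weight += presents[i]
--             count += 1
--             qe *= presents[i]
--             included[i] = True
--             i += 1
--         if weight == desired:
--             if count < best_count or (count == best_count and qe < best_qe):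
--                 best_count = count
--                 best_qe = qe
--         while True:
--             if i == 0:
--                 return best_qe
--             i -= 1
--             if included[i]:
--                 included[i] = False
--                 weight -= presents[i]
--                 count -= 1
--                 qe //= presents[i]
--                 i += 1
--                 break
--
--     return best_qe
-- ===== SOURCE B (Python) =====
-- # Same branch-and-bound search as A, written as a pure recursive DFS over the
-- # remaining suffix of the list: no index arithmetic, no inclusion-flag array,
-- # no in-place backtracking and no inverse updates (no qe //= p).
-- def solve(input, compartments):
--     presents = sorted((int(l) for l in input.splitlines()), reverse=True)
--     desired = sum(presents) // compartments
--
--     def go(rest, count, weight, qe, best):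
--         if rest and weight < desired and count < best[0]:
--             best = go(rest[1:], count + 1, weight + rest[0], qe * rest[0], best)
--             return go(rest[1:], count, weight, qe, best)
--         if weight == desired and (count, qe) < best:
--             return (count, qe)
--         return best
--
--     return go(presents, 0, 0, 1, (1000, 1000))[1]
-- ===== Notes on version B (the rewrite author's own statement) =====
-- stated objective: simpler
-- what changed: A's iterative backtracking machine (a mutable inclusion-flag array, an index walked up and down, and inverse updates weight -= p / count -= 1 / qe //= p to undo choices) is replaced by a short pure recursive DFS over the same include/exclude decision tree with the same pruning, threading (count, weight, qe, best) functionally, so the flags array, the backtracking scan and the floor division all disappear.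
import Mathlib
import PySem

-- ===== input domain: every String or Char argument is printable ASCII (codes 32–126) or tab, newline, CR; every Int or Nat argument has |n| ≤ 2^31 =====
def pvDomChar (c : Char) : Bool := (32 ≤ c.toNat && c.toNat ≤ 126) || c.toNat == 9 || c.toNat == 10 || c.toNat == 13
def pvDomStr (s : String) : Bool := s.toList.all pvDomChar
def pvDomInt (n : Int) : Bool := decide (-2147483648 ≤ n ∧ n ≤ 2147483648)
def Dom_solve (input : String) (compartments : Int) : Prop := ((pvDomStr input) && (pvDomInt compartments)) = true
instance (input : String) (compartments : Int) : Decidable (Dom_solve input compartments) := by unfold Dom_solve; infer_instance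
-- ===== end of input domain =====

-- B rewrites A's iterative backtracking machine (inclusion flag array, in-place state
-- with inverse updates weight-=p / qe//=p) as a pure recursive DFS threading its state
-- functionally; same search tree and pruning, different decomposition (objective: simpler).

-- ===== PORT A =====
-- A's inner extension loop `while i < total and weight < desired and count < best_count`:
-- the loop is driven by the suffix presents[i:] (empty iff i == total), so the recursion
-- is structural; i is carried along for `included[i] = True` / `i += 1`.
def pvA_ext (desired bc : Int) :
    List Int → Nat → Int → Int → Int → List Bool → Nat × Int × Int × Int × List Bool
  | [], i, count, qe, weight, inc => (i, count, qe, weight, inc)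
  | p :: rest, i, count, qe, weight, inc =>
    if weight < desired ∧ count < bc then
      pvA_ext desired bc rest (i + 1) (count + 1) (qe * p) (weight + p) (inc.set i true)
    else (i, count, qe, weight, inc)

-- A's inner backtracking loop: `none` is Python's `return best_qe` (the scan hit i == 0).
def pvA_bt (ps : List Int) :
    Nat → Int → Int → Int → List Bool → Option (Nat × Int × Int × Int × List Bool)
  | 0, _, _, _, _ => none
  | (i + 1), count, qe, weight, inc =>
    if inc.getD i false then
      some (i + 1, count - 1, PySem.Int.floordiv qe (ps.getD i 0), weight - ps.getD i 0,
        inc.set i false)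
    else pvA_bt ps i count qe weight inc

-- A's outer `while True` loop, structurally on a fuel that solve instantiates with
-- 2^(len+1); the zero-fuel branch is proved unreachable below (pvA_outer_sim /
-- pvNu_add_le: each iteration strictly grows a < 2^(len+1) measure), so the port
-- computes exactly A's loop.  State order follows Python's `(i, count, qe, weight)`.
def pvA_outer (ps : List Int) (desired : Int) :
    Nat → Nat → Int → Int → Int → List Bool → Int → Int → Int
  | 0, _, _, _, _, _, _, bq => bq
  | (fuel + 1), i, count, qe, weight, inc, bc, bq =>
    let r := pvA_ext desired bc (ps.drop i) i count qe weight inc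
    let best : Int × Int :=
      if r.2.2.2.1 = desired ∧ (r.2.1 < bc ∨ (r.2.1 = bc ∧ r.2.2.1 < bq)) then
        (r.2.1, r.2.2.1)
      else (bc, bq)
    match pvA_bt ps r.1 r.2.1 r.2.2.1 r.2.2.2.1 r.2.2.2.2 with
    | none => best.2
    | some s2 => pvA_outer ps desired fuel s2.1 s2.2.1 s2.2.2.1 s2.2.2.2.1 s2.2.2.2.2
        best.1 best.2

def solve (input : String) (compartments : Int) : Int :=
  let presents := PySem.List.sorted
    ((PySem.Str.splitlines input).map (fun l => (PySem.Int.ofStr? l).getD 0)) (fun x => x) true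
  let desired := PySem.Int.floordiv presents.sum compartments
  pvA_outer presents desired (2 ^ (presents.length + 1)) 0 0 1 0
    (List.replicate presents.length false) 1000 1000

-- ===== PORT B =====
-- Source B's recursive `go` over the remaining suffix: include branch first (computing the
-- new best), then the exclude branch; `(count, qe) < best` is Python's lexicographic
-- tuple comparison.
def pvB_go (desired : Int) : List Int → Int → Int → Int → Int × Int → Int × Int
  | p :: rest, count, weight, qe, best =>
    if weight < desired ∧ count < best.1 then
      pvB_go desired rest count weight qe
        (pvB_go desired rest (count + 1) (weight + p) (qe * p) best)
    else if weight = desired ∧ (count < best.1 ∨ (count = best.1 ∧ qe < best.2)) then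
      (count, qe)
    else best
  | [], count, weight, qe, best =>
    if weight = desired ∧ (count < best.1 ∨ (count = best.1 ∧ qe < best.2)) then
      (count, qe)
    else best

def solve_alt (input : String) (compartments : Int) : Int :=
  let presents := PySem.List.sorted
    ((PySem.Str.splitlines input).map (fun l => (PySem.Int.ofStr? l).getD 0)) (fun x => x) true
  let desired := PySem.Int.floordiv presents.sum compartments
  (pvB_go desired presents 0 0 1 (1000, 1000)).2

-- ===== PRECONDITION & SPEC =====
-- Pre_ excludes exactly the inputs where the Python A raises: a line int() cannot parse
-- (ValueError), compartments == 0 (ZeroDivisionError in `sum // compartments`), and a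
-- present equal to 0 while desired > 0 — then A's backtracking always reaches
-- `qe //= presents[i]` with presents[i] == 0 (ZeroDivisionError).
def Pre_solve (input : String) (compartments : Int) : Prop :=
  compartments ≠ 0 ∧
  (∀ l ∈ PySem.Str.splitlines input, (PySem.Int.ofStr? l).isSome) ∧
  ((0 : Int) ∈ (PySem.Str.splitlines input).map (fun l => (PySem.Int.ofStr? l).getD 0) →
    PySem.Int.floordiv
      ((PySem.Str.splitlines input).map (fun l => (PySem.Int.ofStr? l).getD 0)).sum
      compartments ≤ 0)
instance (input : String) (compartments : Int) : Decidable (Pre_solve input compartments) := by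
  unfold Pre_solve; infer_instance

def pvWitness_solve : String × Int := ("10\n5\n5", 2)

def Spec_solve (input : String) (compartments : Int) (out : Int) : Prop :=
  out = solve_alt input compartments
instance (input : String) (compartments : Int) (out : Int) : Decidable (Spec_solve input compartments out) := by unfold Spec_solve; infer_instance

-- ===== CLAIM (what is proved, stated in full; the proofs are below) =====
def Claim_equal_solve : Prop := ∀ (input : String) (compartments : Int), Dom_solve input compartments → Pre_solve input compartments → Spec_solve input compartments (solve input compartments)

-- ===== LEMMAS AND PROOFS =====

-- mask basics ---------------------------------------------------------------------

lemma pv_getD_set_ne (inc : List Bool) (m k : Nat) (b : Bool) (h : m ≠ k) :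
    (inc.set m b).getD k false = inc.getD k false := by
  simp [List.getD_eq_getElem?_getD, List.getElem?_set_ne h]

lemma pv_getD_set_self_false (inc : List Bool) (m : Nat) :
    (inc.set m false).getD m false = false := by
  rcases Nat.lt_or_ge m inc.length with h | h
  · simp [List.getD_eq_getElem?_getD, List.getElem?_set_self (by simpa using h)]
  · have hl : (inc.set m false).length ≤ m := by simpa using h
    simp [List.getD_eq_getElem?_getD, List.getElem?_eq_none_iff.mpr hl]

lemma pv_getD_set_self_true (inc : List Bool) (m : Nat) (h : m < inc.length) :
    (inc.set m true).getD m false = true := by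
  simp [List.getD_eq_getElem?_getD, List.getElem?_set_self (by simpa using h)]

lemma pv_getD_replicate (n k : Nat) : (List.replicate n false).getD k false = false := by
  rcases Nat.lt_or_ge k n with h | h
  · simp [List.getD_eq_getElem?_getD, h]
  · have hl : (List.replicate n false).length ≤ k := by simpa using h
    simp [List.getD_eq_getElem?_getD, List.getElem?_eq_none_iff.mpr hl]

lemma pv_getD_mem (ps : List Int) (m : Nat) (h : m < ps.length) : ps.getD m 0 ∈ ps := by
  rw [List.getD_eq_getElem?_getD, List.getElem?_eq_getElem h]
  exact List.getElem_mem h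

-- the fuel measure: the binary value (msb = index 0) of the decided-and-excluded
-- positions strictly grows with every outer iteration of A
def pvNu (n : Nat) (inc : List Bool) (i : Nat) : Nat :=
  ∑ k ∈ Finset.range i, if inc.getD k false then 0 else 2 ^ (n - k)

lemma pvNu_congr (n : Nat) (inc₁ inc₂ : List Bool) (i : Nat)
    (h : ∀ k, k < i → inc₁.getD k false = inc₂.getD k false) :
    pvNu n inc₁ i = pvNu n inc₂ i := by
  unfold pvNu
  exact Finset.sum_congr rfl (fun k hk => by rw [h k (Finset.mem_range.mp hk)])

lemma pvNu_succ (n : Nat) (inc : List Bool) (m : Nat) :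
    pvNu n inc (m + 1) = pvNu n inc m + (if inc.getD m false then 0 else 2 ^ (n - m)) :=
  Finset.sum_range_succ _ m

lemma pvNu_add_le (n : Nat) (inc : List Bool) (i : Nat) (hi : i ≤ n) :
    pvNu n inc i + 2 ^ (n + 1 - i) ≤ 2 ^ (n + 1) := by
  induction i with
  | zero => simp [pvNu]
  | succ m ih =>
    have hm : m ≤ n := by omega
    have h1 : pvNu n inc (m + 1) ≤ pvNu n inc m + 2 ^ (n - m) := by
      rw [pvNu_succ]
      refine Nat.add_le_add_left ?_ _
      split
      · exact Nat.zero_le _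
      · exact le_refl _
    have h2 : 2 ^ (n + 1 - m) = 2 ^ (n + 1 - (m + 1)) * 2 := by
      rw [← pow_succ]; congr 1; omega
    have h3 : 2 ^ (n + 1 - (m + 1)) = 2 ^ (n - m) := by congr 1; omega
    have h4 := ih hm
    rw [h2, h3] at h4
    rw [h3]
    linarith

lemma pvA_ext_nu (ps : List Int) (desired bc : Int) :
    ∀ rest i count qe weight inc, rest = ps.drop i → i ≤ ps.length →
      (pvA_ext desired bc rest i count qe weight inc).1 ≤ ps.length ∧
      pvNu ps.length inc i ≤
        pvNu ps.length (pvA_ext desired bc rest i count qe weight inc).2.2.2.2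
          (pvA_ext desired bc rest i count qe weight inc).1 := by
  intro rest
  induction rest with
  | nil => intro i count qe weight inc _ hi; exact ⟨hi, le_refl _⟩
  | cons p rest' ih =>
    intro i count qe weight inc hrest hi
    by_cases hg : weight < desired ∧ count < bc
    · rw [pvA_ext, if_pos hg]
      have hiLt : i < ps.length := by
        by_contra hcon
        have : ps.drop i = [] := List.drop_eq_nil_iff.mpr (by omega)
        rw [← hrest] at this
        exact List.cons_ne_nil _ _ this
      have hrest' : rest' = ps.drop (i + 1) := by
        have hd := List.drop_eq_getElem_cons hiLt
        rw [← hrest] at hd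
        exact (List.cons.injEq _ _ _ _ ▸ hd).2
      obtain ⟨hl, hnu⟩ := ih (i + 1) (count + 1) (qe * p) (weight + p) (inc.set i true)
        hrest' (by omega)
      refine ⟨hl, le_trans ?_ hnu⟩
      have hset : ∀ k, k < i → (inc.set i true).getD k false = inc.getD k false :=
        fun k hk => pv_getD_set_ne inc i k true (by omega)
      calc pvNu ps.length inc i = pvNu ps.length (inc.set i true) i :=
            (pvNu_congr _ _ _ _ hset).symm
        _ ≤ pvNu ps.length (inc.set i true) (i + 1) := by
            rw [pvNu_succ]; exact Nat.le_add_right _ _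
    · rw [pvA_ext, if_neg hg]
      exact ⟨hi, le_refl _⟩

lemma pvA_bt_nu (ps : List Int) :
    ∀ i count qe weight inc i2 c2 q2 w2 inc2, i ≤ ps.length →
      pvA_bt ps i count qe weight inc = some (i2, c2, q2, w2, inc2) →
      i2 ≤ ps.length ∧
      pvNu ps.length inc i + 2 ^ (ps.length + 1 - i) ≤ pvNu ps.length inc2 i2 := by
  intro i
  induction i with
  | zero =>
    intro count qe weight inc i2 c2 q2 w2 inc2 hi h2
    simp [pvA_bt] at h2
  | succ m ih =>
    intro count qe weight inc i2 c2 q2 w2 inc2 hi h2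
    rw [pvA_bt] at h2
    by_cases hb : inc.getD m false = true
    · rw [if_pos hb] at h2
      simp only [Option.some.injEq, Prod.mk.injEq] at h2
      obtain ⟨hii, hcc, hqq, hww, hinc⟩ := h2
      subst hii hinc
      refine ⟨hi, ?_⟩
      have e1 : pvNu ps.length inc (m + 1) = pvNu ps.length inc m := by
        rw [pvNu_succ, if_pos hb]
        exact Nat.add_zero _
      have e2 : pvNu ps.length (inc.set m false) (m + 1) =
          pvNu ps.length (inc.set m false) m + 2 ^ (ps.length - m) := by
        rw [pvNu_succ, if_neg (by rw [pv_getD_set_self_false]; simp)]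
      have e3 : pvNu ps.length (inc.set m false) m = pvNu ps.length inc m :=
        pvNu_congr _ _ _ _ (fun k hk => pv_getD_set_ne inc m k false (by omega))
      have e4 : ps.length + 1 - (m + 1) = ps.length - m := by omega
      rw [e1, e2, e3, e4]
    · rw [if_neg hb] at h2
      have hm : m ≤ ps.length := by omega
      obtain ⟨hlen2, hle⟩ := ih count qe weight inc i2 c2 q2 w2 inc2 hm h2
      refine ⟨hlen2, ?_⟩
      have e1 : pvNu ps.length inc (m + 1) = pvNu ps.length inc m + 2 ^ (ps.length - m) := by
        rw [pvNu_succ, if_neg hb]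
      have e2 : 2 ^ (ps.length + 1 - m) = 2 ^ (ps.length - m) + 2 ^ (ps.length - m) := by
        have h5 : ps.length + 1 - m = (ps.length - m) + 1 := by omega
        rw [h5, pow_succ]; ring
      have e4 : ps.length + 1 - (m + 1) = ps.length - m := by omega
      rw [e1, e4]
      rw [e2] at hle
      linarith

-- aggregates of the search state over the inclusion mask: count, weight, qe ------

def pvCnt (inc : List Bool) (j : Nat) : Int :=
  ∑ k ∈ Finset.range j, if inc.getD k false then 1 else 0
def pvW (ps : List Int) (inc : List Bool) (j : Nat) : Int :=
  ∑ k ∈ Finset.range j, if inc.getD k false then ps.getD k 0 else 0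
def pvQ (ps : List Int) (inc : List Bool) (j : Nat) : Int :=
  ∏ k ∈ Finset.range j, if inc.getD k false then ps.getD k 0 else 1

lemma pvCnt_congr (inc₁ inc₂ : List Bool) (j : Nat)
    (h : ∀ k, k < j → inc₁.getD k false = inc₂.getD k false) : pvCnt inc₁ j = pvCnt inc₂ j :=
  Finset.sum_congr rfl (fun k hk => by rw [h k (Finset.mem_range.mp hk)])

lemma pvW_congr (ps : List Int) (inc₁ inc₂ : List Bool) (j : Nat)
    (h : ∀ k, k < j → inc₁.getD k false = inc₂.getD k false) :
    pvW ps inc₁ j = pvW ps inc₂ j :=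
  Finset.sum_congr rfl (fun k hk => by rw [h k (Finset.mem_range.mp hk)])

lemma pvQ_congr (ps : List Int) (inc₁ inc₂ : List Bool) (j : Nat)
    (h : ∀ k, k < j → inc₁.getD k false = inc₂.getD k false) :
    pvQ ps inc₁ j = pvQ ps inc₂ j :=
  Finset.prod_congr rfl (fun k hk => by rw [h k (Finset.mem_range.mp hk)])

lemma pvCnt_succ (inc : List Bool) (j : Nat) :
    pvCnt inc (j + 1) = pvCnt inc j + (if inc.getD j false then 1 else 0) :=
  Finset.sum_range_succ _ j

lemma pvW_succ (ps : List Int) (inc : List Bool) (j : Nat) :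
    pvW ps inc (j + 1) = pvW ps inc j + (if inc.getD j false then ps.getD j 0 else 0) :=
  Finset.sum_range_succ _ j

lemma pvQ_succ (ps : List Int) (inc : List Bool) (j : Nat) :
    pvQ ps inc (j + 1) = pvQ ps inc j * (if inc.getD j false then ps.getD j 0 else 1) :=
  Finset.prod_range_succ _ j

-- the leaf update shared by both programs
def pvLeaf (desired c w q : Int) (b : Int × Int) : Int × Int :=
  if w = desired ∧ (c < b.1 ∨ (c = b.1 ∧ q < b.2)) then (c, q) else b

-- good state: mask has the list's length, everything at or above i is undecided
-- (false), and count/weight/qe are the mask's aggregates below i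
def pvGS (ps : List Int) (inc : List Bool) (i : Nat) (c w q : Int) : Prop :=
  inc.length = ps.length ∧ i ≤ ps.length ∧
  (∀ k, i ≤ k → inc.getD k false = false) ∧
  c = pvCnt inc i ∧ w = pvW ps inc i ∧ q = pvQ ps inc i

-- A's pending continuation, read off the mask: for every included index j below i
-- (deepest first) the exclude branch go(presents[j+1:]) from the state below j is
-- still pending.
def pvK (ps : List Int) (desired : Int) (inc : List Bool) : Nat → Int × Int → Int × Int
  | 0, b => b
  | (j + 1), b =>
    if inc.getD j false then
      pvK ps desired inc j
        (pvB_go desired (ps.drop (j + 1)) (pvCnt inc j) (pvW ps inc j) (pvQ ps inc j) b)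
    else pvK ps desired inc j b

lemma pvK_congr (ps : List Int) (desired : Int) (j : Nat) :
    ∀ (inc₁ inc₂ : List Bool),
      (∀ k, k < j → inc₁.getD k false = inc₂.getD k false) →
      ∀ (b : Int × Int), pvK ps desired inc₁ j b = pvK ps desired inc₂ j b := by
  induction j with
  | zero => intro inc₁ inc₂ h b; rfl
  | succ m ih =>
    intro inc₁ inc₂ h b
    simp only [pvK]
    rw [h m (by omega)]
    have hlow : ∀ k, k < m → inc₁.getD k false = inc₂.getD k false := fun k hk => h k (by omega)
    rw [pvCnt_congr inc₁ inc₂ m hlow, pvW_congr ps inc₁ inc₂ m hlow, pvQ_congr ps inc₁ inc₂ m hlow]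
    split
    · exact ih _ _ hlow _
    · exact ih _ _ hlow _

-- unfolding lemmas for B's go
lemma pvB_go_gate (desired : Int) (p : Int) (rest : List Int) (c w q : Int) (b : Int × Int)
    (h : w < desired ∧ c < b.1) :
    pvB_go desired (p :: rest) c w q b =
      pvB_go desired rest c w q (pvB_go desired rest (c + 1) (w + p) (q * p) b) := by
  rw [pvB_go, if_pos h]

lemma pvB_go_leaf_cons (desired : Int) (p : Int) (rest : List Int) (c w q : Int)
    (b : Int × Int) (h : ¬(w < desired ∧ c < b.1)) :
    pvB_go desired (p :: rest) c w q b = pvLeaf desired c w q b := by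
  rw [pvB_go, if_neg h]; rfl

lemma pvB_go_leaf_nil (desired : Int) (c w q : Int) (b : Int × Int) :
    pvB_go desired [] c w q b = pvLeaf desired c w q b := rfl

-- the extension loop walks exactly B's chain of include branches -----------------

lemma pvA_ext_sim (ps : List Int) (desired : Int) (b : Int × Int) :
    ∀ rest i count qe weight inc i1 c1 q1 w1 inc1,
      rest = ps.drop i →
      pvGS ps inc i count weight qe →
      pvA_ext desired b.1 rest i count qe weight inc = (i1, c1, q1, w1, inc1) →
      pvGS ps inc1 i1 c1 w1 q1 ∧
      pvK ps desired inc1 i1 (pvLeaf desired c1 w1 q1 b) =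
        pvK ps desired inc i (pvB_go desired (ps.drop i) count weight qe b) := by
  intro rest
  induction rest with
  | nil =>
    intro i count qe weight inc i1 c1 q1 w1 inc1 hrest hGS hext
    rw [pvA_ext] at hext
    simp only [Prod.mk.injEq] at hext
    obtain ⟨e1, e2, e3, e4, e5⟩ := hext
    subst e1; subst e2; subst e3; subst e4; subst e5
    rw [← hrest, pvB_go_leaf_nil]
    exact ⟨hGS, rfl⟩
  | cons p rest' ih =>
    intro i count qe weight inc i1 c1 q1 w1 inc1 hrest hGS hext
    obtain ⟨hlen, hile, hhigh, hc, hw, hq⟩ := hGS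
    have hiLt : i < ps.length := by
      by_contra hcon
      have hnil : ps.drop i = [] := List.drop_eq_nil_iff.mpr (by omega)
      rw [← hrest] at hnil
      exact List.cons_ne_nil _ _ hnil
    have hcons : ps.drop i = ps.getD i 0 :: ps.drop (i + 1) := by
      rw [List.drop_eq_getElem_cons hiLt, List.getD_eq_getElem?_getD,
        List.getElem?_eq_getElem hiLt]
      rfl
    have hp : p = ps.getD i 0 := by
      rw [hcons] at hrest
      exact (List.cons.injEq _ _ _ _ ▸ hrest).1
    have hrest' : rest' = ps.drop (i + 1) := by
      rw [hcons] at hrest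
      exact (List.cons.injEq _ _ _ _ ▸ hrest).2
    by_cases hg : weight < desired ∧ count < b.1
    · rw [pvA_ext, if_pos hg] at hext
      have hbit : (inc.set i true).getD i false = true :=
        pv_getD_set_self_true _ _ (by omega)
      have hlow : ∀ k, k < i → (inc.set i true).getD k false = inc.getD k false :=
        fun k hk => pv_getD_set_ne _ _ _ _ (by omega)
      have hGS' : pvGS ps (inc.set i true) (i + 1) (count + 1) (weight + p)
          (qe * p) := by
        refine ⟨by simpa using hlen, by omega, ?_, ?_, ?_, ?_⟩
        · intro k hk
          rw [pv_getD_set_ne _ _ _ _ (by omega)]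
          exact hhigh k (by omega)
        · rw [pvCnt_succ, hbit, if_pos rfl, pvCnt_congr _ _ _ hlow, ← hc]
        · rw [pvW_succ, hbit, if_pos rfl, pvW_congr _ _ _ _ hlow, ← hw, ← hp]
        · rw [pvQ_succ, hbit, if_pos rfl, pvQ_congr _ _ _ _ hlow, ← hq, ← hp]
      obtain ⟨hGS1, hK⟩ := ih (i + 1) (count + 1) (qe * p) (weight + p) (inc.set i true)
        i1 c1 q1 w1 inc1 hrest' hGS' hext
      refine ⟨hGS1, ?_⟩
      rw [hK]
      rw [hcons, ← hp, pvB_go_gate desired p (ps.drop (i + 1)) count weight qe b hg]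
      simp only [pvK]
      rw [hbit, if_pos rfl]
      rw [pvCnt_congr _ _ _ hlow, pvW_congr _ _ _ _ hlow, pvQ_congr _ _ _ _ hlow,
        ← hc, ← hw, ← hq, pvK_congr ps desired i _ _ hlow]
    · rw [pvA_ext, if_neg hg] at hext
      simp only [Prod.mk.injEq] at hext
      obtain ⟨e1, e2, e3, e4, e5⟩ := hext
      subst e1; subst e2; subst e3; subst e4; subst e5
      rw [← hrest, pvB_go_leaf_cons desired p rest' count weight qe b hg]
      exact ⟨⟨hlen, hile, hhigh, hc, hw, hq⟩, rfl⟩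

-- the backtracking loop pops exactly the deepest pending exclude branch ----------

lemma pvA_bt_sim (ps : List Int) (desired : Int) (hnz : ∀ x ∈ ps, x ≠ 0) :
    ∀ i count qe weight inc,
      pvGS ps inc i count weight qe →
      (pvA_bt ps i count qe weight inc = none →
        ∀ v, pvK ps desired inc i v = v) ∧
      (∀ i2 c2 q2 w2 inc2, pvA_bt ps i count qe weight inc = some (i2, c2, q2, w2, inc2) →
        pvGS ps inc2 i2 c2 w2 q2 ∧
        ∀ v, pvK ps desired inc i v =
          pvK ps desired inc2 i2 (pvB_go desired (ps.drop i2) c2 w2 q2 v)) := by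
  intro i
  induction i with
  | zero =>
    intro count qe weight inc hGS
    exact ⟨fun _ v => rfl, fun i2 c2 q2 w2 inc2 h => by simp [pvA_bt] at h⟩
  | succ m ih =>
    intro count qe weight inc hGS
    obtain ⟨hlen, hile, hhigh, hc, hw, hq⟩ := hGS
    by_cases hb : inc.getD m false = true
    · constructor
      · intro hnone
        rw [pvA_bt, if_pos hb] at hnone
        exact absurd hnone (by simp)
      · intro i2 c2 q2 w2 inc2 hsome
        rw [pvA_bt, if_pos hb] at hsome
        simp only [Option.some.injEq, Prod.mk.injEq] at hsome
        obtain ⟨e1, e2, e3, e4, e5⟩ := hsome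
        subst e1; subst e5
        have hmLt : m < ps.length := by omega
        have hp : ps.getD m 0 ≠ 0 := hnz _ (pv_getD_mem ps m hmLt)
        have hbit2 : (inc.set m false).getD m false = false := pv_getD_set_self_false inc m
        have hlow : ∀ k, k < m → (inc.set m false).getD k false = inc.getD k false :=
          fun k hk => pv_getD_set_ne _ _ _ _ (by omega)
        have hcm : pvCnt inc (m + 1) = pvCnt inc m + 1 := by rw [pvCnt_succ, hb, if_pos rfl]
        have hwm : pvW ps inc (m + 1) = pvW ps inc m + ps.getD m 0 := by
          rw [pvW_succ, hb, if_pos rfl]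
        have hqm : pvQ ps inc (m + 1) = pvQ ps inc m * ps.getD m 0 := by
          rw [pvQ_succ, hb, if_pos rfl]
        have hc2 : c2 = pvCnt (inc.set m false) (m + 1) := by
          rw [pvCnt_succ, hbit2, if_neg (by simp), pvCnt_congr _ _ _ hlow]
          rw [hc, hcm] at e2
          omega
        have hw2 : w2 = pvW ps (inc.set m false) (m + 1) := by
          rw [pvW_succ, hbit2, if_neg (by simp), pvW_congr _ _ _ _ hlow]
          rw [hw, hwm] at e4
          omega
        have hq2 : q2 = pvQ ps (inc.set m false) (m + 1) := by
          rw [pvQ_succ, hbit2, if_neg (by simp), pvQ_congr _ _ _ _ hlow]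
          rw [← e3, hq, hqm]
          simp only [mul_one]
          exact Int.mul_fdiv_cancel _ hp
        refine ⟨⟨by simpa using hlen, hile, ?_, hc2, hw2, hq2⟩, ?_⟩
        · intro k hk
          rw [pv_getD_set_ne _ _ _ _ (by omega)]
          exact hhigh k (by omega)
        · intro v
          simp only [pvK]
          rw [hb, if_pos rfl, hbit2, if_neg (by simp)]
          rw [pvK_congr ps desired m (inc.set m false) inc hlow]
          rw [hc2, hw2, hq2]
          rw [pvCnt_succ, hbit2, if_neg (by simp), pvCnt_congr _ _ _ hlow,
            pvW_succ, hbit2, if_neg (by simp), pvW_congr _ _ _ _ hlow,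
            pvQ_succ, hbit2, if_neg (by simp), pvQ_congr _ _ _ _ hlow]
          simp
    · have hb' : inc.getD m false = false := by simpa using hb
      have hGSm : pvGS ps inc m count weight qe := by
        refine ⟨hlen, by omega, ?_, ?_, ?_, ?_⟩
        · intro k hk
          rcases Nat.eq_or_lt_of_le hk with hk' | hk'
          · rw [← hk']; exact hb'
          · exact hhigh k (by omega)
        · rw [hc, pvCnt_succ, hb', if_neg (by simp)]; omega
        · rw [hw, pvW_succ, hb', if_neg (by simp)]; omega
        · rw [hq, pvQ_succ, hb', if_neg (by simp)]; simp
      obtain ⟨ihn, ihs⟩ := ih count qe weight inc hGSm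
      constructor
      · intro hnone v
        rw [pvA_bt, if_neg (by rw [hb']; simp)] at hnone
        simp only [pvK]
        rw [hb', if_neg (by simp)]
        exact ihn hnone v
      · intro i2 c2 q2 w2 inc2 hsome
        rw [pvA_bt, if_neg (by rw [hb']; simp)] at hsome
        obtain ⟨hGS2, hKeq⟩ := ihs i2 c2 q2 w2 inc2 hsome
        refine ⟨hGS2, fun v => ?_⟩
        simp only [pvK]
        rw [hb', if_neg (by simp)]
        exact hKeq v

-- the outer loop computes the continuation pvK of B's recursion ------------------

lemma pvA_outer_sim (ps : List Int) (desired : Int) (hnz : ∀ x ∈ ps, x ≠ 0) :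
    ∀ fuel i count qe weight inc bc bq,
      pvGS ps inc i count weight qe →
      2 ^ (ps.length + 1) - pvNu ps.length inc i ≤ fuel →
      pvA_outer ps desired fuel i count qe weight inc bc bq =
        (pvK ps desired inc i (pvB_go desired (ps.drop i) count weight qe (bc, bq))).2 := by
  intro fuel
  induction fuel with
  | zero =>
    intro i count qe weight inc bc bq hGS hfuel
    have hbound := pvNu_add_le ps.length inc i hGS.2.1
    have h1p : (1 : Nat) ≤ 2 ^ (ps.length + 1 - i) := Nat.one_le_two_pow
    omega
  | succ f ih =>
    intro i count qe weight inc bc bq hGS hfuel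
    rcases hE : pvA_ext desired bc (ps.drop i) i count qe weight inc with
      ⟨i1, c1, q1, w1, inc1⟩
    obtain ⟨hGS1, hK⟩ := pvA_ext_sim ps desired (bc, bq) (ps.drop i) i count qe weight inc
      i1 c1 q1 w1 inc1 rfl hGS hE
    have hnuE := pvA_ext_nu ps desired bc (ps.drop i) i count qe weight inc rfl hGS.2.1
    rw [hE] at hnuE
    simp only at hnuE
    rw [pvA_outer]
    simp only [hE]
    rw [← hK]
    rcases hB : pvA_bt ps i1 c1 q1 w1 inc1 with _ | ⟨i2, c2, q2, w2, inc2⟩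
    · have hnone := (pvA_bt_sim ps desired hnz i1 c1 q1 w1 inc1 hGS1).1 hB
      rw [hnone]
      rfl
    · obtain ⟨hGS2, hKeq⟩ := ((pvA_bt_sim ps desired hnz i1 c1 q1 w1 inc1 hGS1).2)
        i2 c2 q2 w2 inc2 hB
      have hnuB := pvA_bt_nu ps i1 c1 q1 w1 inc1 i2 c2 q2 w2 inc2 hnuE.1 hB
      have h1p : (1 : Nat) ≤ 2 ^ (ps.length + 1 - i1) := Nat.one_le_two_pow
      have hfuel2 : 2 ^ (ps.length + 1) - pvNu ps.length inc2 i2 ≤ f := by omega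
      simp only
      rw [ih i2 c2 q2 w2 inc2 _ _ hGS2 hfuel2]
      rw [hKeq (pvLeaf desired c1 w1 q1 (bc, bq))]
      rfl

-- final assembly ----------------------------------------------------------------

lemma pv_solve_eq (input : String) (compartments : Int)
    (hpre : Pre_solve input compartments) :
    solve input compartments = solve_alt input compartments := by
  obtain ⟨hc0, hparse, hz⟩ := hpre
  unfold solve solve_alt
  set xs := (PySem.Str.splitlines input).map (fun l => (PySem.Int.ofStr? l).getD 0) with hxs
  set ps := PySem.List.sorted xs (fun x => x) true with hps
  set desired := PySem.Int.floordiv ps.sum compartments with hdes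
  show pvA_outer ps desired (2 ^ (ps.length + 1)) 0 0 1 0 (List.replicate ps.length false)
      1000 1000 = (pvB_go desired ps 0 0 1 (1000, 1000)).2
  by_cases h0 : (0 : Int) ∈ xs
  · -- a zero present: Pre_ forces desired ≤ 0, both searches stop at the root leaf
    have hperm : ps.Perm xs := PySem.List.sorted_perm xs _ true
    have hdle : desired ≤ 0 := by
      rw [hdes, hperm.sum_eq]
      exact hz h0
    have hg : ¬((0 : Int) < desired ∧ (0 : Int) < 1000) := by
      intro h
      have := h.1
      omega
    have hext : pvA_ext desired 1000 ps 0 0 1 0 (List.replicate ps.length false) =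
        (0, 0, 1, 0, List.replicate ps.length false) := by
      cases ps with
      | nil => rfl
      | cons p t => rw [pvA_ext, if_neg hg]
    obtain ⟨f, hf⟩ : ∃ f, 2 ^ (ps.length + 1) = f + 1 :=
      ⟨2 ^ (ps.length + 1) - 1, by have : (1 : Nat) ≤ 2 ^ (ps.length + 1) := Nat.one_le_two_pow; omega⟩
    rw [hf, pvA_outer]
    rw [List.drop_zero]
    simp only [hext]
    have hBleaf : pvB_go desired ps 0 0 1 ((1000 : Int), (1000 : Int)) =
        pvLeaf desired 0 0 1 (1000, 1000) := by
      cases ps with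
      | nil => rfl
      | cons p t =>
        exact pvB_go_leaf_cons desired p t 0 0 1 (1000, 1000) (by simpa using hg)
    rw [hBleaf]
    rfl
  · -- no zero present: full simulation of the backtracking machine by the recursion
    have hnz : ∀ x ∈ ps, x ≠ 0 := by
      intro x hx hx0
      exact h0 (hx0 ▸ (PySem.List.mem_sorted xs _ true x).mp hx)
    have hGS0 : pvGS ps (List.replicate ps.length false) 0 0 0 1 := by
      refine ⟨List.length_replicate, Nat.zero_le _, fun k _ => pv_getD_replicate _ k, ?_, ?_, ?_⟩
      · simp [pvCnt]
      · simp [pvW]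
      · simp [pvQ]
    rw [pvA_outer_sim ps desired hnz (2 ^ (ps.length + 1)) 0 0 1 0
      (List.replicate ps.length false) 1000 1000 hGS0 (Nat.sub_le _ _)]
    rw [List.drop_zero]
    rfl

theorem solve_spec : Claim_equal_solve := by
  intro input compartments _hdom hpre
  unfold Spec_solve
  exact pv_solve_eq input compartments hpre
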